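-- pv_equiv track=rewrite | github.com/nail1021734/Taiwan_news_dataset | news/preprocess/factory.py | find_delimiter
-- ===== SOURCE A (Python) =====
-- def find_delimiter(
--     article: str,
--     left_delimiter: str,
--     right_delimiter: str,
--     replace_str: str = '',
--     drop_delimiter: bool = True,
-- ) -> str:
--     r"""將 `article` 內 `left_delimiter` 和 `right_delimiter` 之間的字串替換為 `replace_str`.
--
--     Parameters
--     ==========
--     `article`: str
--         要處理的文章.
--     `left_delimiter`: str
--         `left_delimiter` 與 `right_delimiter` 內的字串會被替換為 `replace_str`.
--     `right_delimiter`: str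
--         `left_delimiter` 與 `right_delimiter` 內的字串會被替換為 `replace_str`.
--     `replace_str`: str
--         選擇要替換的字串.
--     `drop_delimiter`: bool
--         若為 True 則會將 `left_delimiter` 與 `right_delimiter` 一起替換掉, 為 False 則會將
--         `left_delimiter` 與 `right_delimiter` 保留下來.
--     """
--     # A stack to count `left_delimiter` hit amount.
--     count_stack = 0
--
--     # `rp_article` 為最後回傳的文章.
--     rp_article = ''
--     last_index = 0
--     for index, char in enumerate(article):
--         if char == left_delimiter:
--             if count_stack == 0:
--                 # 若 `count_stack == 0` 表示遇到開頭的 `left_delimiter`.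
--                 # 若不等於 0 表示先前已經遇過還沒匹配到 `right_delimiter` 的 `left_delimiter`.
--
--                 # 將 `left_delimiter` 之前的文章片段加到 `rp_article` 之中.
--                 rp_article += article[last_index:index]
--                 if not drop_delimiter:
--                     # 將 `left_delimiter` 加到 `rp_article` 之中.
--                     rp_article += left_delimiter
--             count_stack += 1
--
--         if char == right_delimiter:
--             if count_stack > 0:
--                 # 若 `count_stack > 0` 則 pop 一個元素.
--                 count_stack -= 1
--             else:
--                 # 若 `count_stack == 0` 則直接跳過後續處理(表示沒有匹配的
--                 # `left_delimiter` 無視此 `right_delimiter`).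
--                 continue
--             if count_stack == 0:
--                 # 若 pop 一個元素後 `count_stack == 0` 表示此 `right_delimiter`
--                 # 有匹配的 `left_delimiter` 並且是最外層的 `left_delimiter`.
--
--                 # 使用 `replace_str` 代替先前的文章片段.
--                 rp_article += replace_str
--                 if not drop_delimiter:
--                     # 保留 `right_delimiter`.
--                     rp_article += right_delimiter
--
--                 # 更新 `last_index` 到 `right_delimiter` 的下一個索引.
--                 last_index = index + 1
--
--     # 將 `last_index` 之後的文章, 加到 `rp_article` 之後.
--     rp_article += article[last_index:]
--     return rp_article
-- ===== SOURCE B (Python) =====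
-- def find_delimiter(
--     article: str,
--     left_delimiter: str,
--     right_delimiter: str,
--     replace_str: str = '',
--     drop_delimiter: bool = True,
-- ) -> str:
--     # Pass 1: record the (start, end) index pair of every outermost matched region.
--     spans = []
--     depth = 0
--     start = 0
--     for i, ch in enumerate(article):
--         if ch == left_delimiter:
--             if depth == 0:
--                 start = i
--             depth += 1
--         if ch == right_delimiter and depth > 0:
--             depth -= 1
--             if depth == 0:
--                 spans.append((start, i))
--     # Pass 2: assemble kept slices between regions plus the replacement.
--     parts = []
--     last = 0
--     for s, e in spans:
--         parts.append(article[last:s])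
--         if not drop_delimiter:
--             parts.append(left_delimiter)
--         parts.append(replace_str)
--         if not drop_delimiter:
--             parts.append(right_delimiter)
--         last = e + 1
--     parts.append(article[last:])
--     return ''.join(parts)
-- ===== Notes on version B (the rewrite author's own statement) =====
-- stated objective: alternative
-- what changed: B splits A's single scan-and-accumulate loop into two passes: a first pass that only records the (start, end) spans of outermost matched delimiter regions, and a second pass that assembles the output from the kept slices between those spans plus the replacement, instead of interleaving string building with the depth bookkeeping.
-- intended difference: On articles containing an unmatched outermost left delimiter, A's stale last_index makes it append the text between the last completed region and that delimiter twice (plus an extra left delimiter when drop_delimiter is False), e.g. A('a(b','(',')','',True)='aa(b'; B returns that text once ('a(b'), which is the intended value. — e.g. on find_delimiter("a(b", "(", ")", "", true): A returns "aa(b", B returns "a(b"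
import Mathlib
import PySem

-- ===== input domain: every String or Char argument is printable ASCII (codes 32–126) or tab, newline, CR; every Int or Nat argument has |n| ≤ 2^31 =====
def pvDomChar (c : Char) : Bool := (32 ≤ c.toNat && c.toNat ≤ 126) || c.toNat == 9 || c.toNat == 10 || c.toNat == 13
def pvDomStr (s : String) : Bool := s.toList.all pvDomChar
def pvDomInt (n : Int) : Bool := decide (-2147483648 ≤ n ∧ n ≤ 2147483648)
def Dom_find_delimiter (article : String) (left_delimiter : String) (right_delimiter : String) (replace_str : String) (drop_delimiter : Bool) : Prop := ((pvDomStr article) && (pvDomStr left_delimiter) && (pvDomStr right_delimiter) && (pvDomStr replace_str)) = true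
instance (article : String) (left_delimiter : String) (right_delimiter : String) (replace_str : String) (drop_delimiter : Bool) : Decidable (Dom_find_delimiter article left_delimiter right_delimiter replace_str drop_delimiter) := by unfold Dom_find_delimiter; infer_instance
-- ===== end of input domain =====

-- B replaces A's single accumulate-as-you-scan loop by two passes (collect outermost
-- matched spans, then assemble from them); equivalence is about the return value only.

-- ===== PORT A =====
-- the enumerate loop of A: state (count_stack, rp_article, last_index), index i
def pvALoop (article L R rep : List Char) (drop : Bool) :
    List Char → Nat → Nat → List Char → Nat → List Char × Nat
  | [], _i, _c, rp, last => (rp, last)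
  | ch :: rest, i, c, rp, last =>
    -- if char == left_delimiter:
    let c1 := if L = [ch] then c + 1 else c
    let rp1 := if L = [ch] ∧ c = 0 then
        rp ++ PySem.Chars.slice article (some (last : Int)) (some (i : Int)) ++
          (if !drop then L else [])
      else rp
    -- if char == right_delimiter:
    if R = [ch] then
      if 0 < c1 then
        if c1 - 1 = 0 then
          pvALoop article L R rep drop rest (i + 1) (c1 - 1)
            (rp1 ++ rep ++ (if !drop then R else [])) (i + 1)
        else pvALoop article L R rep drop rest (i + 1) (c1 - 1) rp1 last
      else pvALoop article L R rep drop rest (i + 1) c1 rp1 last  -- continue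
    else pvALoop article L R rep drop rest (i + 1) c1 rp1 last

def find_delimiter (article : String) (left_delimiter : String) (right_delimiter : String) (replace_str : String) (drop_delimiter : Bool) : String :=
  let st := pvALoop article.toList left_delimiter.toList right_delimiter.toList
      replace_str.toList drop_delimiter article.toList 0 0 [] 0
  String.ofList (st.1 ++ PySem.Chars.slice article.toList (some (st.2 : Int)) none)

-- ===== PORT B =====
-- pass 1 of B: collect the (start, end) spans of the outermost matched regions
def pvSpanScan (L R : List Char) :
    List Char → Nat → Nat → Nat → List (Nat × Nat) → List (Nat × Nat)
  | [], _i, _d, _start, spans => spans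
  | ch :: rest, i, d, start, spans =>
    let d1 := if L = [ch] then d + 1 else d
    let start1 := if L = [ch] ∧ d = 0 then i else start
    if R = [ch] ∧ 0 < d1 then
      if d1 - 1 = 0 then pvSpanScan L R rest (i + 1) 0 start1 (spans ++ [(start1, i)])
      else pvSpanScan L R rest (i + 1) (d1 - 1) start1 spans
    else pvSpanScan L R rest (i + 1) d1 start1 spans

-- pass 2 of B: assemble kept slices between the spans plus the replacement
def pvAssemble (article L R rep : List Char) (drop : Bool) :
    List (Nat × Nat) → List Char → Nat → List Char × Nat
  | [], acc, last => (acc, last)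
  | (s, e) :: rest, acc, last =>
    pvAssemble article L R rep drop rest
      (acc ++ PySem.Chars.slice article (some (last : Int)) (some (s : Int)) ++
        (if !drop then L else []) ++ rep ++ (if !drop then R else [])) (e + 1)

def find_delimiter_alt (article : String) (left_delimiter : String) (right_delimiter : String) (replace_str : String) (drop_delimiter : Bool) : String :=
  let spans := pvSpanScan left_delimiter.toList right_delimiter.toList article.toList 0 0 0 []
  let st := pvAssemble article.toList left_delimiter.toList right_delimiter.toList
      replace_str.toList drop_delimiter spans [] 0
  String.ofList (st.1 ++ PySem.Chars.slice article.toList (some (st.2 : Int)) none)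

-- ===== PRECONDITION & SPEC =====
-- Independent statement of the change region: one arithmetic fold with a saturating
-- counter over the article.  State (depth, text-seen-since-last-completed-region,
-- text-before-unclosed-region); it computes neither program's output.
def pvDStep (L R : List Char) (st : Nat × Bool × Bool) (ch : Char) : Nat × Bool × Bool :=
  let inc := if L = [ch] then 1 else 0
  let dec := if R = [ch] ∧ 0 < st.1 + inc then 1 else 0
  (st.1 + inc - dec,
   if st.1 + inc - dec = 0 then decide (dec = 0) else st.2.1,
   if st.1 = 0 ∧ inc = 1 then st.2.1 else st.2.2)

-- On articles with an unmatched outermost left delimiter, A's stale `last_index` makes it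
-- append the text between the last completed region and that delimiter TWICE (plus an extra
-- left delimiter when drop_delimiter is False); B keeps that text once, the intended value.
def D_find_delimiter (article : String) (left_delimiter : String) (right_delimiter : String) (replace_str : String) (drop_delimiter : Bool) : Prop :=
  let t := article.toList.foldl (pvDStep left_delimiter.toList right_delimiter.toList) (0, false, false)
  0 < t.1 ∧ (t.2.2 = true ∨ drop_delimiter = false)
instance (article : String) (left_delimiter : String) (right_delimiter : String) (replace_str : String) (drop_delimiter : Bool) : Decidable (D_find_delimiter article left_delimiter right_delimiter replace_str drop_delimiter) := by unfold D_find_delimiter; infer_instance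

def Spec_find_delimiter (article : String) (left_delimiter : String) (right_delimiter : String) (replace_str : String) (drop_delimiter : Bool) (out : String) : Prop := ¬ D_find_delimiter article left_delimiter right_delimiter replace_str drop_delimiter → out = find_delimiter_alt article left_delimiter right_delimiter replace_str drop_delimiter
instance (article : String) (left_delimiter : String) (right_delimiter : String) (replace_str : String) (drop_delimiter : Bool) (out : String) : Decidable (Spec_find_delimiter article left_delimiter right_delimiter replace_str drop_delimiter out) := by unfold Spec_find_delimiter; infer_instance

def pvDiffWitness_find_delimiter : String × String × String × String × Bool := ("a(b", "(", ")", "", true)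
def pvDiffWitnessOut_find_delimiter : String × String := ("aa(b", "a(b")

-- ===== CLAIM (what is proved, stated in full; the proofs are below) =====
def Claim_unchanged_find_delimiter : Prop := ∀ (article : String) (left_delimiter : String) (right_delimiter : String) (replace_str : String) (drop_delimiter : Bool), Dom_find_delimiter article left_delimiter right_delimiter replace_str drop_delimiter → Spec_find_delimiter article left_delimiter right_delimiter replace_str drop_delimiter (find_delimiter article left_delimiter right_delimiter replace_str drop_delimiter)
def Claim_changed_find_delimiter : Prop := Dom_find_delimiter (pvDiffWitness_find_delimiter.1) (pvDiffWitness_find_delimiter.2.1) (pvDiffWitness_find_delimiter.2.2.1) (pvDiffWitness_find_delimiter.2.2.2.1) (pvDiffWitness_find_delimiter.2.2.2.2) ∧ D_find_delimiter (pvDiffWitness_find_delimiter.1) (pvDiffWitness_find_delimiter.2.1) (pvDiffWitness_find_delimiter.2.2.1) (pvDiffWitness_find_delimiter.2.2.2.1) (pvDiffWitness_find_delimiter.2.2.2.2) ∧ find_delimiter (pvDiffWitness_find_delimiter.1) (pvDiffWitness_find_delimiter.2.1) (pvDiffWitness_find_delimiter.2.2.1) (pvDiffWitness_find_delimiter.2.2.2.1)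 (pvDiffWitness_find_delimiter.2.2.2.2) = pvDiffWitnessOut_find_delimiter.1 ∧ find_delimiter_alt (pvDiffWitness_find_delimiter.1) (pvDiffWitness_find_delimiter.2.1) (pvDiffWitness_find_delimiter.2.2.1) (pvDiffWitness_find_delimiter.2.2.2.1) (pvDiffWitness_find_delimiter.2.2.2.2) = pvDiffWitnessOut_find_delimiter.2 ∧ pvDiffWitnessOut_find_delimiter.1 ≠ pvDiffWitnessOut_find_delimiter.2
def Claim_exact_find_delimiter : Prop := ∀ (article : String) (left_delimiter : String) (right_delimiter : String) (replace_str : String) (drop_delimiter : Bool), Dom_find_delimiter article left_delimiter right_delimiter replace_str drop_delimiter → D_find_delimiter article left_delimiter right_delimiter replace_str drop_delimiter → find_delimiter article left_delimiter right_delimiter replace_str drop_delimiter ≠ find_delimiter_alt article left_delimiter right_delimiter replace_str drop_delimiter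

-- ===== LEMMAS AND PROOFS =====

-- Nat-state matching scan used by the proofs; pvDScan_to_step ties the foldl in
-- D_find_delimiter to it.
def pvDScan (L R : List Char) : List Char → Nat → Nat → Nat → Nat → Nat × Nat × Nat
  | [], _i, d, last, op => (d, last, op)
  | ch :: rest, i, d, last, op =>
    let d1 := if L = [ch] then d + 1 else d
    let op1 := if L = [ch] ∧ d = 0 then i else op
    if R = [ch] ∧ 0 < d1 then
      if d1 - 1 = 0 then pvDScan L R rest (i + 1) 0 (i + 1) op1
      else pvDScan L R rest (i + 1) (d1 - 1) last op1
    else pvDScan L R rest (i + 1) d1 last op1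

lemma pvDStep_scan (L R : List Char) :
    ∀ (rest : List Char) (i d last op : Nat) (pend gap : Bool),
    (d = 0 → pend = decide (last < i) ∧ last ≤ i) →
    (0 < d → gap = decide (last < op)) →
    (rest.foldl (pvDStep L R) (d, pend, gap)).1 = (pvDScan L R rest i d last op).1 ∧
    (0 < (pvDScan L R rest i d last op).1 →
      (rest.foldl (pvDStep L R) (d, pend, gap)).2.2
        = decide ((pvDScan L R rest i d last op).2.1 < (pvDScan L R rest i d last op).2.2)) := by
  intro rest
  induction rest with
  | nil =>
    intro i d last op pend gap h1 h2
    simp only [List.foldl_nil, pvDScan]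
    exact ⟨trivial, fun hp => h2 hp⟩
  | cons ch rest ih =>
    intro i d last op pend gap h1 h2
    rw [List.foldl_cons]
    by_cases hL : L = [ch] <;> by_cases hR : R = [ch] <;> by_cases hd : d = 0
    · -- empty outermost region: depth back to 0, text counter reset
      subst hd
      have hstep : pvDStep L R (0, pend, gap) ch = (0, false, pend) := by
        simp [pvDStep, hL, hR]
      rw [hstep]
      simpa [pvDScan, hL, hR] using
        ih (i + 1) 0 (i + 1) i false pend (fun _ => by simp) (fun hp => absurd hp (by omega))
    · -- nested empty region
      have hp0 := Nat.pos_of_ne_zero hd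
      have hstep : pvDStep L R (d, pend, gap) ch = (d, pend, gap) := by
        have e1 : ¬(d + 1 - 1 = 0) := by omega
        simp [pvDStep, hL, hR, hd]
      rw [hstep]
      have e1 : ¬(d + 1 - 1 = 0) := by omega
      simpa [pvDScan, hL, hR, hd, e1] using ih (i + 1) d last op pend gap (fun h => by omega) h2
    · -- open an outermost region at i
      subst hd
      obtain ⟨hpe, hle⟩ := h1 rfl
      have hstep : pvDStep L R (0, pend, gap) ch = (1, pend, pend) := by
        simp [pvDStep, hL, hR]
      rw [hstep]
      simpa [pvDScan, hL, hR] using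
        ih (i + 1) 1 last i pend pend (fun h => by omega) (fun _ => hpe)
    · -- open a nested region
      have hstep : pvDStep L R (d, pend, gap) ch = (d + 1, pend, gap) := by
        simp [pvDStep, hL, hR, hd]
      rw [hstep]
      simpa [pvDScan, hL, hR, hd] using
        ih (i + 1) (d + 1) last op pend gap (fun h => by omega) (fun _ => h2 (Nat.pos_of_ne_zero hd))
    · -- unmatched right delimiter at depth 0: plain text
      subst hd
      obtain ⟨hpe, hle⟩ := h1 rfl
      have hstep : pvDStep L R (0, pend, gap) ch = (0, true, gap) := by
        simp [pvDStep, hL, hR]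
      rw [hstep]
      simpa [pvDScan, hL, hR] using
        ih (i + 1) 0 last op true gap (fun _ => ⟨by simp; omega, by omega⟩)
          (fun hp => absurd hp (by omega))
    · by_cases hd1 : d = 1
      · -- close the outermost region
        subst hd1
        have hstep : pvDStep L R (1, pend, gap) ch = (0, false, gap) := by
          simp [pvDStep, hL, hR]
        rw [hstep]
        simpa [pvDScan, hL, hR] using
          ih (i + 1) 0 (i + 1) op false gap (fun _ => by simp) (fun hp => absurd hp (by omega))
      · -- close a nested region
        have h2' : 0 < d := Nat.pos_of_ne_zero hd
        have e1 : ¬(d - 1 = 0) := by omega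
        have hstep : pvDStep L R (d, pend, gap) ch = (d - 1, pend, gap) := by
          have c1 : (R = [ch] ∧ 0 < d + 0) := ⟨hR, by omega⟩
          simp only [pvDStep, if_neg hL]
          simp [hR, e1, hd, h2']
        rw [hstep]
        simpa [pvDScan, hL, hR, hd, e1, h2'] using
          ih (i + 1) (d - 1) last op pend gap (fun h => by omega) (fun _ => h2 h2')
    · -- plain character at depth 0
      subst hd
      obtain ⟨hpe, hle⟩ := h1 rfl
      have hstep : pvDStep L R (0, pend, gap) ch = (0, true, gap) := by
        simp [pvDStep, hL, hR]
      rw [hstep]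
      simpa [pvDScan, hL, hR] using
        ih (i + 1) 0 last op true gap (fun _ => ⟨by simp; omega, by omega⟩)
          (fun hp => absurd hp (by omega))
    · -- plain character at positive depth
      have hstep : pvDStep L R (d, pend, gap) ch = (d, pend, gap) := by
        simp [pvDStep, hL, hR, hd]
      rw [hstep]
      simpa [pvDScan, hL, hR, hd] using
        ih (i + 1) d last op pend gap (fun h => by omega) h2

-- the slice kept between positions a and b of the article
def pvSeg (article : List Char) (a b : Nat) : List Char :=
  PySem.Chars.slice article (some (a : Int)) (some (b : Int))

def pvKp (xs : List Char) (drop : Bool) : List Char := if !drop then xs else []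

def pvRen (article L R rep : List Char) (drop : Bool) (spans : List (Nat × Nat)) :
    List Char × Nat :=
  pvAssemble article L R rep drop spans [] 0

-- A's accumulator (rp_article) expressed from B's scan state
def pvAbs (article L R rep : List Char) (drop : Bool) (d start : Nat)
    (spans : List (Nat × Nat)) : List Char :=
  if d = 0 then (pvRen article L R rep drop spans).1
  else (pvRen article L R rep drop spans).1 ++
    pvSeg article (pvRen article L R rep drop spans).2 start ++ pvKp L drop

lemma pvSeg_eq (article : List Char) (a b : Nat) :
    pvSeg article a b = (article.drop a).take (b - a) := by
  simp [pvSeg, PySem.Chars.slice_eq_listSlice, PySem.List.slice_natCast]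

lemma pvSeg_self (article : List Char) (a : Nat) : pvSeg article a a = [] := by
  simp [pvSeg_eq]

lemma pvAssemble_append (article L R rep : List Char) (drop : Bool) :
    ∀ (xs ys : List (Nat × Nat)) (acc : List Char) (last : Nat),
    pvAssemble article L R rep drop (xs ++ ys) acc last
      = pvAssemble article L R rep drop ys
          (pvAssemble article L R rep drop xs acc last).1
          (pvAssemble article L R rep drop xs acc last).2 := by
  intro xs
  induction xs with
  | nil => intro ys acc last; simp [pvAssemble]
  | cons p rest ih =>
    intro ys acc last
    obtain ⟨s, e⟩ := p
    simp [pvAssemble, ih]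

lemma pvRen_snoc (article L R rep : List Char) (drop : Bool)
    (spans : List (Nat × Nat)) (s e : Nat) :
    pvRen article L R rep drop (spans ++ [(s, e)])
      = ((pvRen article L R rep drop spans).1 ++
          pvSeg article (pvRen article L R rep drop spans).2 s ++
          pvKp L drop ++ rep ++ pvKp R drop, e + 1) := by
  simp [pvRen, pvAssemble_append, pvAssemble, pvSeg, pvKp]

lemma pvAbs_pos (article L R rep : List Char) (drop : Bool) (d start : Nat)
    (spans : List (Nat × Nat)) (hd : d ≠ 0) :
    pvAbs article L R rep drop d start spans
      = (pvRen article L R rep drop spans).1 ++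
        pvSeg article (pvRen article L R rep drop spans).2 start ++ pvKp L drop := by
  simp [pvAbs, hd]

-- Master invariant: A's loop, run from the state abstracted out of B's scan state,
-- lands in the state abstracted out of B's final scan state; and the matching scan
-- pvDScan tracks (depth, assembled last index, region start) of that same state.
lemma pvAbs_zero (article L R rep : List Char) (drop : Bool) (start : Nat)
    (spans : List (Nat × Nat)) :
    pvAbs article L R rep drop 0 start spans = (pvRen article L R rep drop spans).1 := by
  simp [pvAbs]

lemma pvMaster (article L R rep : List Char) (drop : Bool) :
    ∀ (rest : List Char) (i d start : Nat) (spans : List (Nat × Nat)),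
    pvALoop article L R rep drop rest i d
        (pvAbs article L R rep drop d start spans)
        (pvRen article L R rep drop spans).2
      = (pvAbs article L R rep drop
            (pvDScan L R rest i d (pvRen article L R rep drop spans).2 start).1
            (pvDScan L R rest i d (pvRen article L R rep drop spans).2 start).2.2
            (pvSpanScan L R rest i d start spans),
         (pvRen article L R rep drop (pvSpanScan L R rest i d start spans)).2)
    ∧ (pvDScan L R rest i d (pvRen article L R rep drop spans).2 start).2.1
        = (pvRen article L R rep drop (pvSpanScan L R rest i d start spans)).2 := by
  intro rest
  induction rest with
  | nil => intro i d start spans; simp [pvALoop, pvDScan, pvSpanScan]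
  | cons ch rest ih =>
    intro i d start spans
    by_cases hL : L = [ch] <;> by_cases hR : R = [ch] <;> by_cases hd : d = 0
    · -- open and immediately close an empty outermost region at i
      subst hd
      simpa [pvALoop, pvDScan, pvSpanScan, hL, hR, pvAbs_zero, pvRen_snoc,
             pvSeg, pvKp, List.append_assoc] using ih (i + 1) 0 i (spans ++ [(i, i)])
    · -- both match, nested: depth d+1 then back to d > 0
      have h2 : ¬(d + 1 - 1 = 0) := by omega
      simpa [pvALoop, pvDScan, pvSpanScan, hL, hR, hd, h2, pvAbs_pos, pvSeg, pvKp,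
             List.append_assoc] using ih (i + 1) d start spans
    · -- open an outermost region at i
      subst hd
      simpa [pvALoop, pvDScan, pvSpanScan, hL, hR, pvAbs_zero, pvAbs_pos,
             pvSeg, pvKp, List.append_assoc] using ih (i + 1) 1 i spans
    · -- open a nested region
      simpa [pvALoop, pvDScan, pvSpanScan, hL, hR, hd, pvAbs_pos, pvSeg, pvKp,
             List.append_assoc] using ih (i + 1) (d + 1) start spans
    · -- unmatched right delimiter: skipped
      subst hd
      simpa [pvALoop, pvDScan, pvSpanScan, hL, hR, pvAbs_zero, pvSeg, pvKp,
             List.append_assoc] using ih (i + 1) 0 start spans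
    · by_cases hd1 : d = 1
      · -- close the outermost region at i
        subst hd1
        simpa [pvALoop, pvDScan, pvSpanScan, hL, hR, pvAbs_zero, pvAbs_pos, pvRen_snoc,
               pvSeg, pvKp, List.append_assoc] using ih (i + 1) 0 start (spans ++ [(start, i)])
      · -- close a nested region
        have h2 : ¬(d - 1 = 0) := by omega
        have h3 : 0 < d := Nat.pos_of_ne_zero hd
        simpa [pvALoop, pvDScan, pvSpanScan, hL, hR, hd, h2, pvAbs_pos, h3, pvSeg, pvKp,
               List.append_assoc] using ih (i + 1) (d - 1) start spans
    · subst hd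
      simpa [pvALoop, pvDScan, pvSpanScan, hL, hR, pvAbs_zero, pvSeg, pvKp,
             List.append_assoc] using ih (i + 1) 0 start spans
    · simpa [pvALoop, pvDScan, pvSpanScan, hL, hR, hd, pvAbs_pos, pvSeg, pvKp,
             List.append_assoc] using ih (i + 1) d start spans


-- Bounds carried by the matching scan: if the final depth is positive, the start of the
-- unclosed region lies between the end of the last completed region and the article's end.
lemma pvDScan_bounds (L R : List Char) :
    ∀ (rest : List Char) (i d last op : Nat),
    (0 < d → last ≤ op ∧ op < i) → (d = 0 → last ≤ i) →
    ((0 < (pvDScan L R rest i d last op).1 →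
        (pvDScan L R rest i d last op).2.1 ≤ (pvDScan L R rest i d last op).2.2 ∧
        (pvDScan L R rest i d last op).2.2 < i + rest.length) ∧
     ((pvDScan L R rest i d last op).1 = 0 →
        (pvDScan L R rest i d last op).2.1 ≤ i + rest.length)) := by
  intro rest
  induction rest with
  | nil =>
    intro i d last op h1 h2
    simp only [pvDScan, List.length_nil]
    exact ⟨fun hd => ⟨(h1 hd).1, by have := (h1 hd).2; omega⟩, fun hd => by have := h2 hd; omega⟩
  | cons ch rest ih =>
    intro i d last op h1 h2
    by_cases hL : L = [ch] <;> by_cases hR : R = [ch] <;> by_cases hd : d = 0 <;>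
        (try subst hL) <;> (try subst hR) <;> (try subst hd)
    · obtain ⟨Ha, Hb⟩ := ih (i + 1) 0 (i + 1) i (fun h => absurd h (by omega)) (fun _ => le_refl _)
      simp [pvDScan]
      exact ⟨fun hx => ⟨(Ha hx).1, by have := (Ha hx).2; omega⟩,
             fun hx => by have := Hb hx; omega⟩
    · have hp := h1 (Nat.pos_of_ne_zero hd)
      obtain ⟨Ha, Hb⟩ := ih (i + 1) d last op (fun _ => by omega) (fun h => by omega)
      simp [pvDScan, hd]
      exact ⟨fun hx => ⟨(Ha hx).1, by have := (Ha hx).2; omega⟩,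
             fun hx => by have := Hb hx; omega⟩
    · have hp := h2 rfl
      obtain ⟨Ha, Hb⟩ := ih (i + 1) 1 last i (fun _ => by omega) (fun h => by omega)
      simp [pvDScan, hR]
      exact ⟨fun hx => ⟨(Ha hx).1, by have := (Ha hx).2; omega⟩,
             fun hx => by have := Hb hx; omega⟩
    · have hp := h1 (Nat.pos_of_ne_zero hd)
      obtain ⟨Ha, Hb⟩ := ih (i + 1) (d + 1) last op (fun _ => by omega) (fun h => by omega)
      simp [pvDScan, hR, hd]
      exact ⟨fun hx => ⟨(Ha hx).1, by have := (Ha hx).2; omega⟩,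
             fun hx => by have := Hb hx; omega⟩
    · have hp := h2 rfl
      obtain ⟨Ha, Hb⟩ := ih (i + 1) 0 last op (fun h => absurd h (by omega)) (fun _ => by omega)
      simp [pvDScan, hL]
      exact ⟨fun hx => ⟨(Ha hx).1, by have := (Ha hx).2; omega⟩,
             fun hx => by have := Hb hx; omega⟩
    · by_cases hd1 : d = 1
      · subst hd1
        obtain ⟨Ha, Hb⟩ := ih (i + 1) 0 (i + 1) op (fun h => absurd h (by omega)) (fun _ => le_refl _)
        simp [pvDScan, hL]
        exact ⟨fun hx => ⟨(Ha hx).1, by have := (Ha hx).2; omega⟩,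
               fun hx => by have := Hb hx; omega⟩
      · have hp := h1 (Nat.pos_of_ne_zero hd)
        obtain ⟨Ha, Hb⟩ := ih (i + 1) (d - 1) last op (fun _ => by omega) (fun h => by omega)
        have h2' : ¬(d - 1 = 0) := by omega
        have h3 : 0 < d := Nat.pos_of_ne_zero hd
        simp [pvDScan, hL, hd, h2', h3]
        exact ⟨fun hx => ⟨(Ha hx).1, by have := (Ha hx).2; omega⟩,
               fun hx => by have := Hb hx; omega⟩
    · have hp := h2 rfl
      obtain ⟨Ha, Hb⟩ := ih (i + 1) 0 last op (fun h => absurd h (by omega)) (fun _ => by omega)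
      simp [pvDScan, hL, hR]
      exact ⟨fun hx => ⟨(Ha hx).1, by have := (Ha hx).2; omega⟩,
             fun hx => by have := Hb hx; omega⟩
    · have hp := h1 (Nat.pos_of_ne_zero hd)
      obtain ⟨Ha, Hb⟩ := ih (i + 1) d last op (fun _ => by omega) (fun h => by omega)
      simp [pvDScan, hL, hR, hd]
      exact ⟨fun hx => ⟨(Ha hx).1, by have := (Ha hx).2; omega⟩,
             fun hx => by have := Hb hx; omega⟩

-- A positive final depth means some article character equals the left delimiter,
-- so the left delimiter is a one-character string.
lemma pvDScan_match (L R : List Char) :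
    ∀ (rest : List Char) (i d last op : Nat),
    0 < (pvDScan L R rest i d last op).1 → 0 < d ∨ ∃ ch, ch ∈ rest ∧ L = [ch] := by
  intro rest
  induction rest with
  | nil => intro i d last op h; simp only [pvDScan] at h; exact Or.inl h
  | cons ch rest ih =>
    intro i d last op h
    by_cases hL : L = [ch]
    · exact Or.inr ⟨ch, List.mem_cons_self, hL⟩
    · by_cases hR : R = [ch] <;> by_cases hd : d = 0 <;> (try subst hR) <;> (try subst hd)
      · simp [pvDScan, hL] at h
        rcases ih _ _ _ _ h with h' | ⟨c, hc, hLc⟩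
        · omega
        · exact Or.inr ⟨c, List.mem_cons_of_mem _ hc, hLc⟩
      · exact Or.inl (Nat.pos_of_ne_zero hd)
      · simp [pvDScan, hL, hR] at h
        rcases ih _ _ _ _ h with h' | ⟨c, hc, hLc⟩
        · omega
        · exact Or.inr ⟨c, List.mem_cons_of_mem _ hc, hLc⟩
      · exact Or.inl (Nat.pos_of_ne_zero hd)

-- ===== VERDICT (by name: the statement is the Claim_ definition above) =====
theorem find_delimiter_spec : Claim_unchanged_find_delimiter := by
  intro article L R rep drop _dom hD
  obtain ⟨hA, hlast⟩ :=
    pvMaster article.toList L.toList R.toList rep.toList drop article.toList 0 0 0 []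
  have e1 : pvAbs article.toList L.toList R.toList rep.toList drop 0 0 [] = [] := by
    simp [pvAbs, pvRen, pvAssemble]
  have e2 : (pvRen article.toList L.toList R.toList rep.toList drop []).2 = 0 := rfl
  rw [e1] at hA
  rw [e2] at hA hlast
  simp only [D_find_delimiter] at hD
  have hds := pvDStep_scan L.toList R.toList article.toList 0 0 0 0 false false
    (fun _ => ⟨by simp, le_refl 0⟩) (fun h => absurd h (by omega))
  rw [hds.1] at hD
  simp only [find_delimiter, find_delimiter_alt, hA]
  by_cases h1 : (pvDScan L.toList R.toList article.toList 0 0 0 0).1 = 0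
  · simp [pvAbs_zero, h1, pvRen]
  · have hpos := Nat.pos_of_ne_zero h1
    have hgap := hds.2 hpos
    have hle := ((pvDScan_bounds L.toList R.toList article.toList 0 0 0 0
      (fun h => absurd h (by omega)) (fun _ => le_refl 0)).1 hpos).1
    have h2 : (pvDScan L.toList R.toList article.toList 0 0 0 0).2.2
        = (pvDScan L.toList R.toList article.toList 0 0 0 0).2.1 ∧ drop = true := by
      rcases not_and_or.mp hD with h | h
      · exact absurd hpos h
      · rw [not_or] at h
        obtain ⟨hg, hdr⟩ := h
        rw [hgap] at hg
        simp only [decide_eq_true_eq] at hg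
        refine ⟨by omega, ?_⟩
        cases drop with
        | false => exact absurd rfl hdr
        | true => rfl
    rw [pvAbs_pos _ _ _ _ _ _ _ _ h1, h2.1, hlast, pvSeg_self]
    simp [pvKp, h2.2, pvRen]
theorem find_delimiter_changed : Claim_changed_find_delimiter := by
  unfold Claim_changed_find_delimiter; decide
theorem find_delimiter_tight : Claim_exact_find_delimiter := by
  intro article L R rep drop _dom hDc
  simp only [D_find_delimiter] at hDc
  have hds := pvDStep_scan L.toList R.toList article.toList 0 0 0 0 false false
    (fun _ => ⟨by simp, le_refl 0⟩) (fun h => absurd h (by omega))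
  rw [hds.1] at hDc
  obtain ⟨hpos, hor⟩ := hDc
  have hgap := hds.2 hpos
  obtain ⟨hA, hlast⟩ :=
    pvMaster article.toList L.toList R.toList rep.toList drop article.toList 0 0 0 []
  have e1 : pvAbs article.toList L.toList R.toList rep.toList drop 0 0 [] = [] := by
    simp [pvAbs, pvRen, pvAssemble]
  have e2 : (pvRen article.toList L.toList R.toList rep.toList drop []).2 = 0 := rfl
  rw [e1] at hA
  rw [e2] at hA hlast
  simp only [pvRen] at hA hlast
  obtain ⟨Hb, _⟩ := pvDScan_bounds L.toList R.toList article.toList 0 0 0 0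
      (fun h => absurd h (by omega)) (fun _ => le_refl 0)
  have hbb := Hb hpos
  intro heq
  simp only [find_delimiter, find_delimiter_alt, hA] at heq
  rw [pvAbs_pos _ _ _ _ _ _ _ _ (Nat.pos_iff_ne_zero.mp hpos)] at heq
  simp only [pvRen] at heq
  have hlists := congrArg String.toList heq
  simp only [String.toList_ofList] at hlists
  have hlen := congrArg List.length hlists
  simp only [List.length_append, pvSeg_eq, List.length_take, List.length_drop, pvKp] at hlen
  rw [← hlast] at hlen
  rcases hor with hg | hfalse
  · rw [hgap] at hg
    simp only [decide_eq_true_eq] at hg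
    omega
  · subst hfalse
    rcases pvDScan_match L.toList R.toList article.toList 0 0 0 0 hpos with h | ⟨c, _, hLc⟩
    · omega
    · rw [hLc] at hlen
      try simp at hlen
      omega
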